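-- pv_equiv track=rewrite | github.com/jackparsonss/good-guy-blahaj | src/rank_server.py | to_running_index
-- ===== SOURCE A (Python) =====
-- def to_running_index(words_index):
--     running_index = [-1 for _ in range(words_index[-1][0] + len(words_index[-1][1]))]
--
--     for i in range(len(running_index)):
--         for ii, word in enumerate(words_index):
--             start = word[0]
--             cease = word[0] + len(word[1]) - 1
--
--             if start <= i <= cease:
--                 running_index[i] = ii
--
--     return running_index
-- ===== SOURCE B (Python) =====
-- def to_running_index(words_index):
--     n = words_index[-1][0] + len(words_index[-1][1])
--     out = [-1] * max(n, 0)
--     for ii, (start, word) in enumerate(words_index):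
--         for i in range(max(start, 0), min(start + len(word), n)):
--             out[i] = ii
--     return out
-- ===== Notes on version B (the rewrite author's own statement) =====
-- stated objective: faster
-- what changed: A scans every word for every output position (positions x words); B makes a single pass over the words and fills each word's clamped position range directly, later words overwriting earlier ones.
import Mathlib
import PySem

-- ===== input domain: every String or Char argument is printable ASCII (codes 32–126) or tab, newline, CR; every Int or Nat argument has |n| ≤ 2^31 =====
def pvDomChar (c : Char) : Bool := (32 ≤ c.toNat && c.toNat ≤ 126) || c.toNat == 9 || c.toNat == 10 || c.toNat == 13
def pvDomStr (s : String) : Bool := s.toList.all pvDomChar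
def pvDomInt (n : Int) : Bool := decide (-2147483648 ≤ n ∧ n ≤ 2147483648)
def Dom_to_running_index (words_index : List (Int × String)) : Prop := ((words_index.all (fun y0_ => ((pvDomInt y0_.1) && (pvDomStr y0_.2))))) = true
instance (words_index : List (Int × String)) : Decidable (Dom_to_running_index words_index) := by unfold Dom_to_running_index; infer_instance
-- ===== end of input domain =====

-- B replaces A's position×word double scan by a single pass over the words that fills each
-- word's (clamped) position range; objective: faster (O(N+M) vs O(N*M)).


-- ===== PORT A =====
-- inner loop of A: for ii, word in enumerate(words_index): if start <= i <= cease: running_index[i] = ii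
def pvInnerA (words_index : List (Int × String)) (arr : List Int) (i : Int) : List Int :=
  (PySem.List.enumerate words_index).foldl (fun arr p =>
    if p.2.1 ≤ i ∧ i ≤ p.2.1 + PySem.Str.len p.2.2 - 1 then PySem.List.pySetD arr i p.1 else arr) arr

def to_running_index (words_index : List (Int × String)) : List Int :=
  match PySem.List.pyGet? words_index (-1) with
  | none => []   -- Python raises IndexError here (excluded by Pre_)
  | some last =>
    let running_index : List Int :=
      (PySem.List.pyRange 0 (last.1 + PySem.Str.len last.2) 1).map (fun _ => (-1 : Int))
    (PySem.List.pyRange 0 (running_index.length : Int) 1).foldl (pvInnerA words_index) running_index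

-- ===== PORT B =====
def to_running_index_alt (words_index : List (Int × String)) : List Int :=
  match PySem.List.pyGet? words_index (-1) with
  | none => []   -- Python raises IndexError here (excluded by Pre_)
  | some last =>
    let n : Int := last.1 + PySem.Str.len last.2
    let out : List Int := List.replicate (max n 0).toNat (-1 : Int)
    (PySem.List.enumerate words_index).foldl (fun out p =>
      (PySem.List.pyRange (max p.2.1 0) (min (p.2.1 + PySem.Str.len p.2.2) n) 1).foldl
        (fun out i => PySem.List.pySetD out i p.1) out) out

-- ===== PRECONDITION & SPEC =====
-- Pre_ excludes only the empty list, on which Python A raises IndexError (words_index[-1]).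
def Pre_to_running_index (words_index : List (Int × String)) : Prop := words_index ≠ []
instance (words_index : List (Int × String)) : Decidable (Pre_to_running_index words_index) := by unfold Pre_to_running_index; infer_instance
def pvWitness_to_running_index : (List (Int × String)) := [((0 : Int), "ab"), ((2 : Int), "c")]

def Spec_to_running_index (words_index : List (Int × String)) (out : List Int) : Prop := out = to_running_index_alt words_index
instance (words_index : List (Int × String)) (out : List Int) : Decidable (Spec_to_running_index words_index out) := by unfold Spec_to_running_index; infer_instance

-- ===== CLAIM (what is proved, stated in full; the proofs are below) =====
def Claim_equal_to_running_index : Prop := ∀ (words_index : List (Int × String)), Dom_to_running_index words_index → Pre_to_running_index words_index → Spec_to_running_index words_index (to_running_index words_index)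

-- ===== LEMMAS AND PROOFS =====

-- the value both programs store at position j: the last entry of l whose span covers j
def pvLastCover (l : List (Int × (Int × String))) (j : Int) (x : Int) : Int :=
  l.foldl (fun acc p => if p.2.1 ≤ j ∧ j ≤ p.2.1 + PySem.Str.len p.2.2 - 1 then p.1 else acc) x

-- A side: one pass of the inner loop, read at an arbitrary position j
theorem pvInnerA_get (words_index : List (Int × String)) (arr : List Int) (i : Int)
    (hi : 0 ≤ i) (j : Nat) :
    (pvInnerA words_index arr i)[j]? =
      if i = (j : Int) then (arr[j]?).map (pvLastCover (PySem.List.enumerate words_index) i)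
      else arr[j]? := by
  unfold pvInnerA pvLastCover
  generalize PySem.List.enumerate words_index = l
  induction l generalizing arr with
  | nil => simp
  | cons p l ih =>
    simp only [List.foldl_cons]
    rw [ih]
    by_cases hij : i = (j : Int)
    · rw [if_pos hij, if_pos hij]
      by_cases hc : p.2.1 ≤ i ∧ i ≤ p.2.1 + PySem.Str.len p.2.2 - 1
      · rw [if_pos hc, PySem.List.pySetD_of_nonneg arr p.1 hi]
        have htn : i.toNat = j := by omega
        rw [List.getElem?_set, if_pos htn]
        by_cases hl : j < arr.length
        · rw [if_pos (by omega), List.getElem?_eq_getElem hl]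
          simp only [Option.map_some]
          rw [if_pos hc]
        · rw [if_neg (by omega), List.getElem?_eq_none (by omega)]
          rfl
      · rw [if_neg hc]
        cases h : arr[j]? with
        | none => rfl
        | some x =>
          simp only [Option.map_some]
          rw [if_neg hc]
    · rw [if_neg hij, if_neg hij]
      by_cases hc : p.2.1 ≤ i ∧ i ≤ p.2.1 + PySem.Str.len p.2.2 - 1
      · rw [if_pos hc, PySem.List.pySetD_of_nonneg arr p.1 hi, List.getElem?_set, if_neg (by omega)]
      · rw [if_neg hc]

-- A side: outer iterations at other positions leave position j alone
theorem pvOuterA_unchanged (words_index : List (Int × String)) (L : List Int) (arr : List Int)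
    (j : Nat) (h : ∀ i ∈ L, 0 ≤ i ∧ i ≠ (j : Int)) :
    (L.foldl (pvInnerA words_index) arr)[j]? = arr[j]? := by
  induction L generalizing arr with
  | nil => rfl
  | cons i L ih =>
    have hi := h i (by simp)
    rw [List.foldl_cons, ih _ (fun i' hi' => h i' (by simp [hi'])),
        pvInnerA_get words_index arr i hi.1 j, if_neg hi.2]

-- A side: a position that does not exist stays nonexistent
theorem pvOuterA_none (words_index : List (Int × String)) (L : List Int) (arr : List Int)
    (j : Nat) (h : ∀ i ∈ L, 0 ≤ i) (hn : arr[j]? = none) :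
    (L.foldl (pvInnerA words_index) arr)[j]? = none := by
  induction L generalizing arr with
  | nil => exact hn
  | cons i L ih =>
    rw [List.foldl_cons]
    refine ih _ (fun i' hi' => h i' (by simp [hi'])) ?_
    rw [pvInnerA_get words_index arr i (h i (by simp)) j, hn]
    split <;> rfl

-- B side: filling the range [a, b) with v, read at position j
theorem pvFill_get (a b v : Int) (o : List Int) (j : Nat) (ha : 0 ≤ a) :
    ((PySem.List.pyRange a b 1).foldl (fun o i => PySem.List.pySetD o i v) o)[j]? =
      if a ≤ (j : Int) ∧ (j : Int) < b ∧ j < o.length then some v else o[j]? := by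
  generalize hk : (b - a).toNat = k
  induction k generalizing a o with
  | zero =>
    rw [PySem.List.pyRange_one_eq_nil (by omega), List.foldl_nil, if_neg (by omega)]
  | succ k ih =>
    rw [PySem.List.pyRange_one_cons (by omega), List.foldl_cons,
        PySem.List.pySetD_of_nonneg o v ha,
        ih (a + 1) _ (by omega) (by omega)]
    simp only [List.length_set, List.getElem?_set]
    by_cases h1 : a + 1 ≤ (j : Int) ∧ (j : Int) < b ∧ j < o.length
    · rw [if_pos h1, if_pos (by omega)]
    · rw [if_neg h1]
      by_cases he : a.toNat = j
      · by_cases hl : j < o.length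
        · rw [if_pos he, if_pos (by omega), if_pos (show a ≤ (j : Int) ∧ (j : Int) < b ∧ j < o.length by omega)]
        · rw [if_pos he, if_neg (by omega), if_neg (by omega), List.getElem?_eq_none (by omega)]
      · rw [if_neg he, if_neg (by omega)]

-- B side: the whole pass over the words, read at position j
theorem pvB_get (n : Int) (l : List (Int × (Int × String))) (o : List Int) (j : Nat) :
    ((l.foldl (fun out p =>
        (PySem.List.pyRange (max p.2.1 0) (min (p.2.1 + PySem.Str.len p.2.2) n) 1).foldl
          (fun out i => PySem.List.pySetD out i p.1) out) o)[j]?) =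
      (o[j]?).map (fun x => l.foldl
        (fun acc p => if max p.2.1 0 ≤ (j : Int) ∧ (j : Int) < min (p.2.1 + PySem.Str.len p.2.2) n then p.1 else acc) x) := by
  induction l generalizing o with
  | nil =>
    simp only [List.foldl_nil]
    cases h : o[j]? <;> rfl
  | cons p l ih =>
    simp only [List.foldl_cons]
    rw [ih, pvFill_get _ _ _ _ _ (by omega)]
    cases h : o[j]? with
    | none =>
      have hlen : o.length ≤ j := List.getElem?_eq_none_iff.mp h
      rw [if_neg (by omega)]
      rfl
    | some x =>
      have hl : j < o.length := by
        rcases List.getElem?_eq_some_iff.mp h with ⟨h1, _⟩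
        exact h1
      by_cases hc : max p.2.1 0 ≤ (j : Int) ∧ (j : Int) < min (p.2.1 + PySem.Str.len p.2.2) n
      · rw [if_pos ⟨hc.1, hc.2, hl⟩]
        simp only [Option.map_some, if_pos hc]
      · rw [if_neg (fun hh => hc ⟨hh.1, hh.2.1⟩)]
        simp only [Option.map_some, if_neg hc]

-- the two per-position folds agree when 0 ≤ j < n
theorem pvFold_congr (n j : Int) (hj : 0 ≤ j) (hn : j < n) (l : List (Int × (Int × String))) (x : Int) :
    pvLastCover l j x =
    l.foldl (fun acc p => if max p.2.1 0 ≤ j ∧ j < min (p.2.1 + PySem.Str.len p.2.2) n then p.1 else acc) x := by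
  unfold pvLastCover
  induction l generalizing x with
  | nil => rfl
  | cons p l ih =>
    simp only [List.foldl_cons]
    rw [ih]
    congr 1
    have hL : (0 : Int) ≤ PySem.Str.len p.2.2 := by
      rw [PySem.Str.len_eq]; exact Int.natCast_nonneg _
    split_ifs with h1 h2 h2 <;> first | rfl | omega

-- ===== VERDICT (by name: the statement is the Claim_ definition above) =====
theorem to_running_index_spec : Claim_equal_to_running_index := by
  intro wi hdom hpre
  unfold Spec_to_running_index to_running_index to_running_index_alt
  rw [PySem.List.pyGet?_neg_one, List.getLast?_eq_some_getLast hpre]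
  dsimp only
  set last := wi.getLast hpre with hlast
  set n : Int := last.1 + PySem.Str.len last.2 with hn
  have lenri : ((PySem.List.pyRange 0 n 1).map (fun _ => (-1 : Int))).length = n.toNat := by
    rw [List.length_map, PySem.List.length_pyRange_one]
    omega
  apply List.ext_getElem?
  intro j
  have hrep : (List.replicate (max n 0).toNat (-1 : Int))[j]? =
      if j < n.toNat then some (-1) else none := by
    rw [List.getElem?_replicate]
    by_cases hj : j < n.toNat
    · rw [if_pos (by omega), if_pos hj]
    · rw [if_neg (by omega), if_neg hj]
  rw [pvB_get, hrep, lenri]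
  by_cases hj : j < n.toNat
  · -- position j exists: both sides hold the last covering word index
    rw [if_pos hj]
    have hsplit : PySem.List.pyRange 0 ((n.toNat : Nat) : Int) 1 =
        (PySem.List.pyRange 0 (j : Int) 1 ++ [(j : Int)]) ++ PySem.List.pyRange ((j : Int) + 1) ((n.toNat : Nat) : Int) 1 := by
      rw [← PySem.List.pyRange_one_succ_right (by omega)]
      exact PySem.List.pyRange_one_append 0 ((j : Int) + 1) _ (by omega) (by omega)
    rw [hsplit, List.foldl_append, List.foldl_append, List.foldl_cons, List.foldl_nil]
    rw [pvOuterA_unchanged wi _ _ j (by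
      intro i hi
      rw [PySem.List.mem_pyRange_one] at hi
      constructor <;> omega)]
    rw [pvInnerA_get wi _ _ (by omega) j, if_pos rfl]
    rw [pvOuterA_unchanged wi _ _ j (by
      intro i hi
      rw [PySem.List.mem_pyRange_one] at hi
      constructor <;> omega)]
    rw [List.getElem?_map, PySem.List.getElem?_pyRange_one, if_pos (by omega)]
    simp only [Option.map_some]
    rw [pvFold_congr n (j : Int) (by omega) (by omega)]
  · -- position j beyond the output length: both sides have nothing there
    rw [if_neg hj]
    rw [pvOuterA_none wi _ _ j (by
      intro i hi
      rw [PySem.List.mem_pyRange_one] at hi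
      omega) (by
      rw [List.getElem?_eq_none (by omega)])]
    rfl
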